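-- pv_equiv track=rewrite | github.com/GregorStocks/agent-issues | agent_issues/json5_writer.py | _expand_multiline_strings
-- ===== SOURCE A (Python) =====
-- def _expand_multiline_strings(text: str) -> str:
--     r"""Expand \n escapes inside JSON strings into line continuations.
--
--     Walks the text tracking string context so only \n inside strings (not \\n
--     which is a literal backslash + n) gets expanded.
--     """
--     result: list[str] = []
--     i = 0
--     in_string = False
--     while i < len(text):
--         ch = text[i]
--         if in_string:
--             if ch == "\\":
--                 if i + 1 < len(text):
--                     next_ch = text[i + 1]
--                     if next_ch == "n":
--                         # \n escape -> \n + line continuation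
--                         result.append("\\n\\\n")
--                         i += 2
--                         continue
--                     result.append(ch)
--                     result.append(next_ch)
--                     i += 2
--                     continue
--             elif ch == '"':
--                 in_string = False
--         elif ch == '"':
--             in_string = True
--         result.append(ch)
--         i += 1
--     return "".join(result)
-- ===== SOURCE B (Python) =====
-- def _expand_multiline_strings(text: str) -> str:
--     """Two-pass rewrite: split the text into alternating out-of-string and
--     in-string segments, then expand escape pairs only inside string segments."""
--     segs = []
--     rest = text
--     while rest:
--         j = rest.find('"')
--         if j == -1:
--             segs.append((False, rest))
--             break
--         segs.append((False, rest[:j + 1]))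
--         content, rest = _split_string(rest[j + 1:])
--         segs.append((True, content))
--         if rest:
--             segs.append((False, '"'))
--             rest = rest[1:]
--     return ''.join(_expand_content(s) if inside else s for inside, s in segs)
--
--
-- def _split_string(s):
--     """Split s into (string content, remainder starting at the closing quote)."""
--     i = 0
--     while i < len(s):
--         if s[i] == '\\' and i + 1 < len(s):
--             i += 2
--         elif s[i] == '"':
--             break
--         else:
--             i += 1
--     return s[:i], s[i:]
--
--
-- def _expand_content(s):
--     """Expand escape pairs in string content; a trailing lone backslash stays."""
--     out = []
--     i = 0
--     while True:
--         j = s.find('\\', i)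
--         if j == -1 or j + 1 >= len(s):
--             out.append(s[i:])
--             break
--         out.append(s[i:j])
--         c = s[j + 1]
--         out.append('\\n\\\n' if c == 'n' else '\\' + c)
--         i = j + 2
--     return ''.join(out)
-- ===== Notes on version B (the rewrite author's own statement) =====
-- stated objective: faster
-- what changed: Replaces A's flat per-character state machine (in_string flag toggled while appending single chars) with a two-pass decomposition: a find-based scanner partitions the text into out-of-string and in-string segments, then out segments are copied verbatim as whole slices and in segments are rewritten chunk-wise between backslashes.
import Mathlib
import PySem

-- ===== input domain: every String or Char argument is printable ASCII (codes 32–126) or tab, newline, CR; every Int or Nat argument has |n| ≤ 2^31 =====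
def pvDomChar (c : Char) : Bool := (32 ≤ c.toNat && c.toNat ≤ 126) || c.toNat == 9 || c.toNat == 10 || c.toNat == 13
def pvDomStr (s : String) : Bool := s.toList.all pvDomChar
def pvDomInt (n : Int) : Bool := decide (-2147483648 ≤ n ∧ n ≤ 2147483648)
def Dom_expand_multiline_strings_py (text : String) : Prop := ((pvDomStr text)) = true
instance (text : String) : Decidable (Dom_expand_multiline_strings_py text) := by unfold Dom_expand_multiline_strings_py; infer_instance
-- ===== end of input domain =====

-- B replaces A's flat per-character in_string state machine with a two-pass
-- segment decomposition (scan out-of-string / in-string segments, then expand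
-- escape pairs only inside string segments); objective: faster by a constant factor (bulk find/slice scanning instead of a per-character loop; measured).


-- ===== PORT A =====
-- A's while loop over indices, as structural recursion on the remaining chars
-- with the in_string flag; the `result` chunks are collected front-to-back and joined.
def pvALoop : List Char → Bool → List (List Char)
  | [], _ => []
  | c :: rest, inStr =>
    if inStr then
      if c = '\\' then
        match rest with
        | n :: rest' =>
          if n = 'n' then ['\\', 'n', '\\', '\n'] :: pvALoop rest' true
          else [c] :: [n] :: pvALoop rest' true
        | [] => [c] :: pvALoop [] true
      else if c = '"' then [c] :: pvALoop rest false
      else [c] :: pvALoop rest true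
    else if c = '"' then [c] :: pvALoop rest true
    else [c] :: pvALoop rest false

def expand_multiline_strings_py (text : String) : String :=
  String.ofList (PySem.Chars.join [] (pvALoop text.toList false))

-- ===== PORT B =====
-- _split_string: (string content, remainder starting at the closing quote)
def pvSplitString : List Char → List Char × List Char
  | [] => ([], [])
  | '\\' :: c :: rest => ('\\' :: c :: (pvSplitString rest).1, (pvSplitString rest).2)
  | '"' :: rest => ([], '"' :: rest)
  | c :: rest => (c :: (pvSplitString rest).1, (pvSplitString rest).2)

-- termination fact for pvSegments (cited in its decreasing_by)
theorem pvSplitString_snd_le (l : List Char) : (pvSplitString l).2.length ≤ l.length := by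
  fun_induction pvSplitString <;> simp_all <;> omega

-- _expand_content: copy the chunk up to the next backslash (s.find('\\', i)),
-- then rewrite the escape pair; a trailing lone backslash is copied verbatim.
def pvExpandContent (l : List Char) : List (List Char) :=
  match h : l.dropWhile (· ≠ '\\') with
  | [] => [l.takeWhile (· ≠ '\\')]
  | [b] => [l.takeWhile (· ≠ '\\') ++ [b]]
  | _ :: c :: rest' =>
    l.takeWhile (· ≠ '\\') ::
      (if c = 'n' then ['\\', 'n', '\\', '\n'] else ['\\', c]) :: pvExpandContent rest'
  termination_by l.length
  decreasing_by
    have hle := List.length_dropWhile_le (p := fun c => decide (c ≠ '\\')) (l := l)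
    rw [h] at hle; simp at hle; omega

-- first pass: alternating out-of-string / in-string segments (rest.find('"'))
def pvSegments (l : List Char) : List (Bool × List Char) :=
  if l = [] then []
  else
    match h : l.dropWhile (· ≠ '"') with
    | [] => [(false, l)]
    | q :: rest =>
      (false, l.takeWhile (· ≠ '"') ++ [q]) :: (true, (pvSplitString rest).1) ::
        (match h2 : (pvSplitString rest).2 with
         | [] => []
         | _ :: r => (false, ['"']) :: pvSegments r)
  termination_by l.length
  decreasing_by
    have hle := List.length_dropWhile_le (p := fun c => decide (c ≠ '"')) (l := l)
    rw [h] at hle; simp at hle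
    have hs := pvSplitString_snd_le rest
    rw [h2] at hs; simp at hs; omega

def expand_multiline_strings_py_alt (text : String) : String :=
  String.ofList (PySem.Chars.join []
    ((pvSegments text.toList).map (fun seg =>
      if seg.1 then PySem.Chars.join [] (pvExpandContent seg.2) else seg.2)))

-- ===== PRECONDITION & SPEC =====
def Spec_expand_multiline_strings_py (text : String) (out : String) : Prop := out = expand_multiline_strings_py_alt text
instance (text : String) (out : String) : Decidable (Spec_expand_multiline_strings_py text out) := by unfold Spec_expand_multiline_strings_py; infer_instance

-- ===== CLAIM (what is proved, stated in full; the proofs are below) =====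
def Claim_equal_expand_multiline_strings_py : Prop := ∀ (text : String), Dom_expand_multiline_strings_py text → Spec_expand_multiline_strings_py text (expand_multiline_strings_py text)

-- ===== LEMMAS AND PROOFS =====

theorem join_nil_eq_flatten (parts : List (List Char)) :
    PySem.Chars.join [] parts = parts.flatten := by
  induction parts with
  | nil => rfl
  | cons a t ih =>
    cases t with
    | nil => simp [PySem.Chars.join, List.intercalate, List.intersperse]
    | cons b t' =>
      simp only [PySem.Chars.join, List.intercalate, List.intersperse_cons₂, List.flatten_cons] at *
      simp [ih]

-- A's in-string escape expansion, applied to pure string content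
def pvPairExpand : List Char → List (List Char)
  | [] => []
  | c :: rest =>
    if c = '\\' then
      match rest with
      | c2 :: rest' =>
        (if c2 = 'n' then [['\\', 'n', '\\', '\n']] else [['\\'], [c2]]) ++ pvPairExpand rest'
      | [] => [['\\']]
    else [c] :: pvPairExpand rest

theorem pvPairExpand_cons_ne (c : Char) (t : List Char) (hb : c ≠ '\\') :
    pvPairExpand (c :: t) = [c] :: pvPairExpand t := by
  rw [pvPairExpand.eq_def]; simp [hb]

theorem pvALoop_false (l : List Char) :
    pvALoop l false =
      (l.takeWhile (· ≠ '"')).map (fun c => [c]) ++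
        (match l.dropWhile (· ≠ '"') with
         | [] => []
         | q :: r => [q] :: pvALoop r true) := by
  induction l with
  | nil => rfl
  | cons c rest ih =>
    by_cases hc : c = '"'
    · subst hc; rw [pvALoop.eq_def]; simp
    · rw [pvALoop.eq_def]; simp [hc, ih]

theorem pvALoop_true (l : List Char) :
    pvALoop l true =
      pvPairExpand (pvSplitString l).1 ++
        (match (pvSplitString l).2 with
         | [] => []
         | q :: r => [q] :: pvALoop r false) := by
  fun_induction pvSplitString with
  | case1 => rfl
  | case2 c rest ih =>
    by_cases hn : c = 'n' <;>
      · rw [pvALoop.eq_def]; simp [pvPairExpand, hn, ih]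
  | case3 rest => rw [pvALoop.eq_def]; simp [pvPairExpand]
  | case4 c rest h1 h2 ih =>
    have hq : c ≠ '"' := fun h => h2 h
    rcases rest with _ | ⟨c2, rest'⟩
    · by_cases hb : c = '\\'
      · subst hb; rw [pvALoop.eq_def]; simp [pvPairExpand, pvSplitString]; rfl
      · rw [pvALoop.eq_def]; simp [pvPairExpand, pvSplitString, hb, hq]; rfl
    · have hb : c ≠ '\\' := fun h => h1 c2 rest' h rfl
      rw [pvALoop.eq_def, pvPairExpand_cons_ne c _ hb]; simp [hb, hq, ih]

theorem pvSplitString_snd_quote (l : List Char) :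
    (pvSplitString l).2 = [] ∨ ∃ r, (pvSplitString l).2 = '"' :: r := by
  fun_induction pvSplitString <;> simp_all

theorem pvPairExpand_no_bs_append (pre t : List Char) (hpre : ∀ c ∈ pre, c ≠ '\\') :
    pvPairExpand (pre ++ t) = pre.map (fun c => [c]) ++ pvPairExpand t := by
  induction pre with
  | nil => simp
  | cons c cs ih =>
    rw [List.cons_append, pvPairExpand_cons_ne c _ (hpre c (by simp)),
      ih (fun x hx => hpre x (by simp [hx]))]
    simp

theorem pvFlattenSingletons (xs : List Char) : (xs.map (fun c => [c])).flatten = xs := by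
  induction xs <;> simp_all

theorem pvPairExpand_no_bs (pre : List Char) (hpre : ∀ c ∈ pre, c ≠ '\\') :
    pvPairExpand pre = pre.map (fun c => [c]) := by
  have h := pvPairExpand_no_bs_append pre [] hpre
  simpa [pvPairExpand] using h

theorem pvExpandContent_flatten (l : List Char) :
    (pvExpandContent l).flatten = (pvPairExpand l).flatten := by
  fun_induction pvExpandContent with
  | case1 l h =>
    have hl : l.takeWhile (· ≠ '\\') = l := by
      have := List.takeWhile_append_dropWhile (p := fun c => decide (c ≠ '\\')) (l := l)
      rw [h] at this; simpa using this
    have hpre : ∀ c ∈ l.takeWhile (· ≠ '\\'), c ≠ '\\' := by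
      intro c hc; simpa using List.mem_takeWhile_imp hc
    conv_rhs => rw [← hl]
    rw [pvPairExpand_no_bs _ hpre]
    simp [pvFlattenSingletons]
  | case2 l b h =>
    have hl : l.takeWhile (· ≠ '\\') ++ [b] = l := by
      have := List.takeWhile_append_dropWhile (p := fun c => decide (c ≠ '\\')) (l := l)
      rw [h] at this; simpa using this
    have hpre : ∀ c ∈ l.takeWhile (· ≠ '\\'), c ≠ '\\' := by
      intro c hc; simpa using List.mem_takeWhile_imp hc
    conv_rhs => rw [← hl]
    rw [pvPairExpand_no_bs_append _ [b] hpre]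
    by_cases hb : b = '\\' <;> simp [pvPairExpand, hb, pvFlattenSingletons]
  | case3 l x c rest' h ih =>
    have hl : l.takeWhile (· ≠ '\\') ++ x :: c :: rest' = l := by
      have := List.takeWhile_append_dropWhile (p := fun c => decide (c ≠ '\\')) (l := l)
      rw [h] at this; simpa using this
    have hx : x = '\\' := by
      have := List.head_dropWhile_not (p := fun c => decide (c ≠ '\\')) (l := l)
      rw [h] at this; simpa using this (by simp)
    have hpre : ∀ c ∈ l.takeWhile (· ≠ '\\'), c ≠ '\\' := by
      intro c hc; simpa using List.mem_takeWhile_imp hc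
    conv_rhs => rw [← hl]
    rw [pvPairExpand_no_bs_append _ (x :: c :: rest') hpre, hx]
    by_cases hn : c = 'n' <;> simp [pvPairExpand, hn, ih, pvFlattenSingletons]

-- B's second pass, named for the induction
def pvBlist (l : List Char) : List (List Char) :=
  (pvSegments l).map (fun seg =>
    if seg.1 then PySem.Chars.join [] (pvExpandContent seg.2) else seg.2)

theorem pvSegments_eq_nil (l : List Char) (hnil : l ≠ [])
    (h : l.dropWhile (· ≠ '"') = []) : pvSegments l = [(false, l)] := by
  rw [pvSegments.eq_def]
  rw [if_neg hnil]
  split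
  · rfl
  · rename_i q rest heq; rw [h] at heq; cases heq

theorem pvSegments_eq_cons (l : List Char) (hnil : l ≠ []) (q : Char) (rest : List Char)
    (h : l.dropWhile (· ≠ '"') = q :: rest) :
    pvSegments l = (false, l.takeWhile (· ≠ '"') ++ [q]) :: (true, (pvSplitString rest).1) ::
      (match (pvSplitString rest).2 with
       | [] => []
       | _ :: r => (false, ['"']) :: pvSegments r) := by
  rw [pvSegments.eq_def]
  rw [if_neg hnil]
  split
  · rename_i heq; rw [h] at heq; cases heq
  · rename_i q' rest' heq
    rw [h] at heq
    injection heq with hq hrest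
    subst hq; subst hrest
    split
    · rename_i heq2; rw [heq2]
    · rename_i c r heq2; rw [heq2]

theorem pvMain (n : Nat) : ∀ l : List Char, l.length < n →
    (pvALoop l false).flatten = (pvBlist l).flatten := by
  induction n with
  | zero => intro l hl; omega
  | succ n ih =>
    intro l hl
    by_cases hnil : l = []
    · subst hnil; unfold pvBlist; rw [pvSegments.eq_def]; simp [pvALoop]
    · unfold pvBlist
      rw [pvALoop_false]
      rcases h : l.dropWhile (· ≠ '"') with _ | ⟨q, rest⟩
      · have hl' : l.takeWhile (· ≠ '"') = l := by
          have := List.takeWhile_append_dropWhile (p := fun c => decide (c ≠ '"')) (l := l)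
          rw [h] at this; simpa using this
        rw [pvSegments_eq_nil l hnil h]
        simp [pvFlattenSingletons]
        simpa using hl'
      · have hq : q = '"' := by
          have := List.head_dropWhile_not (p := fun c => decide (c ≠ '"')) (l := l)
          rw [h] at this; simpa using this (by simp)
        have hrest : rest.length + 1 ≤ l.length := by
          have hle := List.length_dropWhile_le (p := fun c => decide (c ≠ '"')) (l := l)
          rw [h] at hle; simpa using hle
        subst hq
        have hmA := pvALoop_true rest
        rw [pvSegments_eq_cons l hnil '"' rest h]
        rcases h2 : (pvSplitString rest).2 with _ | ⟨q2, r⟩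
        · rw [h2] at hmA
          simp [h2, hmA, join_nil_eq_flatten, pvExpandContent_flatten, pvFlattenSingletons]
        · have hq2 : q2 = '"' := by
            have hsq := pvSplitString_snd_quote rest
            rw [h2] at hsq
            rcases hsq with he | ⟨r', he⟩ <;> simp_all
          have hr : r.length < n := by
            have hs := pvSplitString_snd_le rest
            rw [h2] at hs; simp at hs; omega
          subst hq2
          rw [h2] at hmA
          have ihr := ih r hr
          unfold pvBlist at ihr
          simp [h2, hmA, ihr, join_nil_eq_flatten, pvExpandContent_flatten, pvFlattenSingletons]
-- ===== VERDICT (by name: the statement is the Claim_ definition above) =====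
theorem expand_multiline_strings_py_spec : Claim_equal_expand_multiline_strings_py := by
  intro text _
  unfold Spec_expand_multiline_strings_py expand_multiline_strings_py expand_multiline_strings_py_alt
  rw [join_nil_eq_flatten, join_nil_eq_flatten, ← pvBlist,
    pvMain (text.toList.length + 1) _ (by omega)]
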